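-- pv_equiv track=rewrite | github.com/mihrom/Flag-blade-CNC | readgcode.py | get_pos_not_number_char
-- ===== SOURCE A (Python) =====
-- def get_pos_not_number_char(line, start):
--     i = start
--     num_chars = '.+-0123456789'
--     while i < len(line) and (line[i] in num_chars):
--         if line[i] == '.':
--             num_chars = '+-0123456789'
--         i = i + 1
--     return i
-- ===== SOURCE B (Python) =====
-- def get_pos_not_number_char(line, start):
--     if start >= len(line):
--         return start
--     rest = line[start:].lstrip('+-0123456789')
--     if rest.startswith('.'):
--         rest = rest[1:].lstrip('+-0123456789')
--     return len(line) - len(rest)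
-- ===== Notes on version B (the rewrite author's own statement) =====
-- stated objective: idiomatic
-- what changed: The index-and-mutable-state while loop is replaced by slicing plus str.lstrip over the sign/digit set, an optional single-dot step, and closed arithmetic on the remaining length.
-- intended difference: For -len(line) <= start < 0 A uses Python negative indexing, scanning the tail of the string and then restarting at index 0 with carried dot-state (often returning a negative position), while B reads a negative start as slice notation and returns the front-counted position of the first non-number char at or after that point, which is the intended meaning; D_ is exactly the negative-start inputs where this changes the result (all except lines that are entirely one number-like token with no dot in the scanned tail, where both return len(line)). — e.g. on get_pos_not_number_char("a1", -1): A returns 0, B returns 2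
import Mathlib
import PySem

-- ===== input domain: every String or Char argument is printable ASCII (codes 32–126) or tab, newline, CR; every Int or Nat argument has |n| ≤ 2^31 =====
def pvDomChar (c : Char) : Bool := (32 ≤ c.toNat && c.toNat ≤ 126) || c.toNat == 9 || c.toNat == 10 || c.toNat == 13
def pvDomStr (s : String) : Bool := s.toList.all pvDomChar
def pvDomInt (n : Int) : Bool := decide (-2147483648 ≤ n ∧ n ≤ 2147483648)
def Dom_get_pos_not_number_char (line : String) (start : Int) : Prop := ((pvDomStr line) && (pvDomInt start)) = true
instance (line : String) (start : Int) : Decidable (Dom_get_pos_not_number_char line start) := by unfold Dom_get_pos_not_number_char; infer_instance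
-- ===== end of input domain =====

-- B replaces A's stateful index loop by slicing + lstrip over the sign/digit set and closed arithmetic (idiomatic rewrite, same cost);
-- for negative start the two read the index differently (see D_ below), and where A raises (start < -len(line)) is excluded by Pre_.

-- ===== PORT A =====
-- the while loop, carrying the mutable num_chars string and the index i
-- fuel only totalizes the recursion; the fuel supplied below never runs out (the loop advances i by 1 towards len)
def pvLoopA (cs : List Char) (numChars : List Char) (i : Int) : Nat → Int
  | 0 => i
  | fuel + 1 =>
    if i < (cs.length : Int) then
      match PySem.List.pyGet? cs i with
      | none => i  -- Python raises IndexError here (i < -len); outside Pre_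
      | some c =>
        if c ∈ numChars then
          pvLoopA cs (if c = '.' then "+-0123456789".toList else numChars) (i + 1) fuel
        else i
    else i

def get_pos_not_number_char (line : String) (start : Int) : Int :=
  pvLoopA line.toList ".+-0123456789".toList start
    (((line.toList.length : Int) - start).toNat + 1)

-- ===== PORT B =====
-- membership in the lstrip character set '+-0123456789'
def pvIsSignDigit (c : Char) : Bool := c ∈ "+-0123456789".toList

-- if rest.startswith('.'): rest = rest[1:].lstrip('+-0123456789')
def pvDotStep (rest : List Char) : List Char :=
  match rest with
  | '.' :: r => r.dropWhile pvIsSignDigit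
  | _ => rest

def get_pos_not_number_char_alt (line : String) (start : Int) : Int :=
  let cs := line.toList
  if (cs.length : Int) ≤ start then start
  else
    -- line[start:].lstrip('+-0123456789') : lstrip with a char set = dropWhile membership (exact, ported by hand)
    let rest := pvDotStep ((PySem.List.slice cs (some start) none).dropWhile pvIsSignDigit)
    (cs.length : Int) - rest.length

-- ===== PRECONDITION & SPEC =====
-- Pre_ excludes exactly start < -len(line), where A raises IndexError at its first (negative) index access.
def Pre_get_pos_not_number_char (line : String) (start : Int) : Prop :=
  -(line.toList.length : Int) ≤ start
instance (line : String) (start : Int) : Decidable (Pre_get_pos_not_number_char line start) := by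
  unfold Pre_get_pos_not_number_char; infer_instance

def pvWitness_get_pos_not_number_char : String × Int := ("X+1.5Y", 1)

-- D_'s own description of the input language (independent of the ports)
def pvNumChar (c : Char) : Bool := c == '+' || c == '-' || ('0' ≤ c && c ≤ '9')

-- 'line is entirely one number-like token: a sign/digit run, optionally a single dot and another sign/digit run'
def pvFullNumberish (l : List Char) : Bool :=
  match l.dropWhile pvNumChar with
  | [] => true
  | '.' :: r => r.all pvNumChar
  | _ => false

-- For -len(line) <= start < 0 A uses Python negative indexing, scanning the tail of the string and then restarting at index 0
-- with carried dot-state (often returning a negative position); B reads a negative start as slice notation and returns the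
-- position, counted from the front, of the first non-number char at or after that point, which is the intended meaning.
-- D_ is exactly the negative-start inputs where this changes the result: all except entirely number-like lines with no dot
-- in the scanned tail (there both return len(line)).
def D_get_pos_not_number_char (line : String) (start : Int) : Prop :=
  start < 0 ∧
    ¬ (pvFullNumberish line.toList = true ∧
        '.' ∉ line.toList.drop (line.toList.length + start).toNat)
instance (line : String) (start : Int) : Decidable (D_get_pos_not_number_char line start) := by
  unfold D_get_pos_not_number_char; infer_instance

def Spec_get_pos_not_number_char (line : String) (start : Int) (out : Int) : Prop :=
  ¬ D_get_pos_not_number_char line start → out = get_pos_not_number_char_alt line start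
instance (line : String) (start : Int) (out : Int) : Decidable (Spec_get_pos_not_number_char line start out) := by
  unfold Spec_get_pos_not_number_char; infer_instance

def pvDiffWitness_get_pos_not_number_char : String × Int := ("a1", -1)
def pvDiffWitnessOut_get_pos_not_number_char : Int × Int := (0, 2)

-- ===== CLAIM (what is proved, stated in full; the proofs are below) =====
def Claim_unchanged_get_pos_not_number_char : Prop := ∀ (line : String) (start : Int), Dom_get_pos_not_number_char line start → Pre_get_pos_not_number_char line start → Spec_get_pos_not_number_char line start (get_pos_not_number_char line start)
def Claim_changed_get_pos_not_number_char : Prop := Dom_get_pos_not_number_char (pvDiffWitness_get_pos_not_number_char.1) (pvDiffWitness_get_pos_not_number_char.2) ∧ Pre_get_pos_not_number_char (pvDiffWitness_get_pos_not_number_char.1) (pvDiffWitness_get_pos_not_number_char.2) ∧ D_get_pos_not_number_char (pvDiffWitness_get_pos_not_number_char.1) (pvDiffWitness_get_pos_not_number_char.2) ∧ get_pos_not_number_char (pvDiffWitness_get_pos_not_number_char.1) (pvDiffWitness_get_pos_not_number_char.2) = pvDiffWitnessOut_get_pos_not_number_char.1 ∧ get_pos_not_number_char_alt (pvDiffWitness_get_pos_not_number_char.1)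 (pvDiffWitness_get_pos_not_number_char.2) = pvDiffWitnessOut_get_pos_not_number_char.2 ∧ pvDiffWitnessOut_get_pos_not_number_char.1 ≠ pvDiffWitnessOut_get_pos_not_number_char.2

def Claim_exact_get_pos_not_number_char : Prop := ∀ (line : String) (start : Int), Dom_get_pos_not_number_char line start → Pre_get_pos_not_number_char line start → D_get_pos_not_number_char line start → get_pos_not_number_char line start ≠ get_pos_not_number_char_alt line start

-- ===== LEMMAS AND PROOFS =====

theorem pvDotStep_nil : pvDotStep ([] : List Char) = [] := rfl

theorem pvDotStep_dot (l : List Char) : pvDotStep ('.' :: l) = l.dropWhile pvIsSignDigit := rfl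

theorem pvDotStep_cons_ne (c : Char) (l : List Char) (h : c ≠ '.') :
    pvDotStep (c :: l) = c :: l := by
  unfold pvDotStep
  split
  · next r heq =>
    injection heq with h1 _
    exact absurd h1 h
  · rfl

theorem pvGet_of_drop (cs : List Char) (c : Char) (l : List Char) (i : Int) (h0 : 0 ≤ i)
    (hlen : i.toNat < cs.length) (hd : cs.drop i.toNat = c :: l) :
    PySem.List.pyGet? cs i = some c := by
  have hi : i < (cs.length : Int) := by omega
  have hidx : cs[i.toNat]? = some c := by
    rw [← List.head?_drop, hd]; rfl
  have hval : cs[i.toNat] = c := by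
    rw [List.getElem?_eq_getElem hlen] at hidx
    exact Option.some.inj hidx
  simp [PySem.List.pyGet?, PySem.List.pyIdx?, h0, hi, hval]

-- after the dot: the loop with num_chars = '+-0123456789' is a plain dropWhile
theorem pvLoopA_noDot (cs : List Char) (l : List Char) (i : Int) (fuel : Nat) (h0 : 0 ≤ i)
    (hd : cs.drop i.toNat = l) (hle : i ≤ (cs.length : Int))
    (hfuel : ((cs.length : Int) - i).toNat < fuel) :
    pvLoopA cs "+-0123456789".toList i fuel
      = (cs.length : Int) - (l.dropWhile pvIsSignDigit).length := by
  induction l generalizing i fuel with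
  | nil =>
    have : i = (cs.length : Int) := by
      have := List.drop_eq_nil_iff.mp hd
      omega
    obtain ⟨f, rfl⟩ : ∃ f, fuel = f + 1 := ⟨fuel - 1, by omega⟩
    unfold pvLoopA
    simp [this]
  | cons c l ih =>
    have hlen : i.toNat < cs.length := by
      by_contra h
      rw [List.drop_eq_nil_of_le (by omega)] at hd
      simp at hd
    have hi : i < (cs.length : Int) := by omega
    have hget := pvGet_of_drop cs c l i h0 hlen hd
    have hd' : cs.drop (i + 1).toNat = l := by
      have h1 : (i + 1).toNat = i.toNat + 1 := by omega
      rw [h1, ← List.drop_drop, hd]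
      rfl
    obtain ⟨f, rfl⟩ : ∃ f, fuel = f + 1 := ⟨fuel - 1, by omega⟩
    rw [pvLoopA, if_pos hi, hget]
    dsimp only
    by_cases hmem : c ∈ "+-0123456789".toList
    · have hcd : c ≠ '.' := by
        intro h; subst h; simp at hmem
      rw [if_pos hmem, if_neg hcd]
      rw [ih (i + 1) f (by omega) hd' (by omega) (by omega)]
      have : pvIsSignDigit c = true := by simpa [pvIsSignDigit] using hmem
      simp [List.dropWhile, this]
    · rw [if_neg hmem]
      have : pvIsSignDigit c = false := by simpa [pvIsSignDigit] using hmem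
      have hlength : (cs.drop i.toNat).length = cs.length - i.toNat := List.length_drop ..
      rw [hd] at hlength
      simp only [List.dropWhile, this]
      rw [hlength]
      omega

-- before the dot: the loop with num_chars = '.+-0123456789' computes dropWhile + pvDotStep
theorem pvLoopA_full (cs : List Char) (l : List Char) (i : Int) (fuel : Nat) (h0 : 0 ≤ i)
    (hd : cs.drop i.toNat = l) (hle : i ≤ (cs.length : Int))
    (hfuel : ((cs.length : Int) - i).toNat < fuel) :
    pvLoopA cs ".+-0123456789".toList i fuel
      = (cs.length : Int) - (pvDotStep (l.dropWhile pvIsSignDigit)).length := by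
  induction l generalizing i fuel with
  | nil =>
    have : i = (cs.length : Int) := by
      have := List.drop_eq_nil_iff.mp hd
      omega
    obtain ⟨f, rfl⟩ : ∃ f, fuel = f + 1 := ⟨fuel - 1, by omega⟩
    unfold pvLoopA
    simp [this, pvDotStep]
  | cons c l ih =>
    have hlen : i.toNat < cs.length := by
      by_contra h
      rw [List.drop_eq_nil_of_le (by omega)] at hd
      simp at hd
    have hi : i < (cs.length : Int) := by omega
    have hget := pvGet_of_drop cs c l i h0 hlen hd
    have hd' : cs.drop (i + 1).toNat = l := by
      have h1 : (i + 1).toNat = i.toNat + 1 := by omega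
      rw [h1, ← List.drop_drop, hd]
      rfl
    obtain ⟨f, rfl⟩ : ∃ f, fuel = f + 1 := ⟨fuel - 1, by omega⟩
    rw [pvLoopA, if_pos hi, hget]
    dsimp only
    by_cases hdot : c = '.'
    · subst hdot
      have hmem : ('.' : Char) ∈ ".+-0123456789".toList := by decide
      rw [if_pos hmem, if_pos rfl]
      rw [pvLoopA_noDot cs l (i + 1) f (by omega) hd' (by omega) (by omega)]
      have hsd : pvIsSignDigit '.' = false := by decide
      simp only [List.dropWhile, hsd]
      rw [pvDotStep_dot]
    · by_cases hsd : pvIsSignDigit c = true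
      · have hmem : c ∈ ".+-0123456789".toList := by
          simp [pvIsSignDigit] at hsd
          simp [hsd]
        rw [if_pos hmem, if_neg hdot]
        rw [ih (i + 1) f (by omega) hd' (by omega) (by omega)]
        simp [List.dropWhile, hsd]
      · have hmem : c ∉ ".+-0123456789".toList := by
          simp [pvIsSignDigit] at hsd
          simp [hsd, hdot]
        rw [if_neg hmem]
        have hsd' : pvIsSignDigit c = false := by
          cases h : pvIsSignDigit c
          · rfl
          · exact absurd h hsd
        have hlength : (cs.drop i.toNat).length = cs.length - i.toNat := List.length_drop ..
        rw [hd] at hlength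
        simp only [List.dropWhile, hsd']
        rw [pvDotStep_cons_ne c _ hdot]
        rw [hlength]
        omega

-- character-class facts used in the negative-start agreement case
theorem pvSD_mem_full (c : Char) (h : pvIsSignDigit c = true) :
    c ∈ ".+-0123456789".toList := by
  simp [pvIsSignDigit] at h
  simp
  tauto

theorem pvSD_ne_dot (c : Char) (h : pvIsSignDigit c = true) : c ≠ '.' := by
  intro hc; subst hc; simp [pvIsSignDigit] at h

theorem pvNumChar_eq_sd (c : Char) : pvNumChar c = pvIsSignDigit c := by
  rw [Bool.eq_iff_iff]
  simp [pvNumChar, pvIsSignDigit, Char.ext_iff, Char.le_def, UInt32.le_iff_toNat_le]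
  simp only [← UInt32.toNat_inj, Char.toNat]
  simp only [UInt32.reduceToNat]
  omega

theorem pvFullNumberish_cases (l : List Char) (h : pvFullNumberish l = true) :
    l.dropWhile pvNumChar = [] ∨
      ∃ r, l.dropWhile pvNumChar = '.' :: r ∧ r.all pvNumChar = true := by
  unfold pvFullNumberish at h
  split at h
  · next heq => exact Or.inl heq
  · next r heq => exact Or.inr ⟨r, heq, h⟩
  · simp at h

theorem pvFullNumberish_chars (l : List Char) (h : pvFullNumberish l = true) :
    ∀ c ∈ l, pvIsSignDigit c = true ∨ c = '.' := by
  have hfun : pvNumChar = pvIsSignDigit := funext pvNumChar_eq_sd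
  intro c hc
  rw [← List.takeWhile_append_dropWhile (p := pvIsSignDigit) (l := l)] at hc
  rcases List.mem_append.mp hc with h1 | h1
  · exact Or.inl (List.mem_takeWhile_imp h1)
  · rcases pvFullNumberish_cases l h with hnil | ⟨r, hr, hall⟩
    · rw [hfun] at hnil
      rw [hnil] at h1; simp at h1
    · rw [hfun] at hr hall
      rw [hr] at h1
      rcases List.mem_cons.mp h1 with rfl | hm
      · exact Or.inr rfl
      · exact Or.inl (List.all_eq_true.mp hall c hm)

theorem pvFullNumberish_dotStep (l : List Char) (h : pvFullNumberish l = true) :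
    pvDotStep (l.dropWhile pvIsSignDigit) = [] := by
  have hfun : pvNumChar = pvIsSignDigit := funext pvNumChar_eq_sd
  rcases pvFullNumberish_cases l h with hnil | ⟨r, hr, hall⟩
  · rw [hfun] at hnil
    rw [hnil]; rfl
  · rw [hfun] at hr hall
    rw [hr, pvDotStep_dot]
    exact List.dropWhile_eq_nil_iff.mpr (by simpa using hall)

-- the wrapped phase: from a negative index over an all-sign/digit tail, then the whole (number-like) line, A reaches len
theorem pvLoopA_negWrap (cs : List Char) (k : Nat) (fuel : Nat) (hk : k ≤ cs.length)
    (hall : ∀ c ∈ cs.drop (cs.length - k), pvIsSignDigit c = true)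
    (hfull : pvFullNumberish cs = true) (hfuel : cs.length + k < fuel) :
    pvLoopA cs ".+-0123456789".toList (-(k : Int)) fuel = (cs.length : Int) := by
  induction k generalizing fuel with
  | zero =>
    have := pvLoopA_full cs cs 0 fuel (by omega) (by simp) (by omega) (by omega)
    rw [pvFullNumberish_dotStep cs hfull] at this
    simpa using this
  | succ k ih =>
    obtain ⟨f, rfl⟩ : ∃ f, fuel = f + 1 := ⟨fuel - 1, by omega⟩
    have hlt : (-(((k : Nat) + 1 : Nat) : Int)) < (cs.length : Int) := by
      push_cast; omega
    have hidx : cs.length - (k + 1) < cs.length := by omega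
    have hidxv : cs[cs.length - (k + 1)]? = some cs[cs.length - (k + 1)] :=
      List.getElem?_eq_getElem hidx
    have hmemd : cs[cs.length - (k + 1)] ∈ cs.drop (cs.length - (k + 1)) := by
      apply List.mem_of_mem_head?
      simp [List.head?_drop, hidxv]
    have hsd : pvIsSignDigit cs[cs.length - (k + 1)] = true := hall _ hmemd
    have hget : PySem.List.pyGet? cs (-(((k : Nat) + 1 : Nat) : Int)) = some cs[cs.length - (k + 1)] := by
      have hneg : ¬ (0 ≤ (-(((k : Nat) + 1 : Nat) : Int))) := by push_cast; omega
      have hge : -(cs.length : Int) ≤ (-(((k : Nat) + 1 : Nat) : Int)) := by push_cast; omega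
      simp only [PySem.List.pyGet?, PySem.List.pyIdx?]
      rw [if_neg hneg, if_pos hge]
      have : (-(-(((k : Nat) + 1 : Nat) : Int))).toNat = k + 1 := by push_cast; omega
      rw [this]
      simp [hidxv]
    rw [pvLoopA, if_pos hlt, hget]
    dsimp only
    rw [if_pos (pvSD_mem_full _ hsd), if_neg (pvSD_ne_dot _ hsd)]
    have hstep : (-(((k : Nat) + 1 : Nat) : Int)) + 1 = -(k : Int) := by push_cast; omega
    rw [hstep]
    apply ih f (by omega) ?_ (by omega)
    intro c hc
    apply hall
    have hdd : cs.drop (cs.length - k) = (cs.drop (cs.length - (k + 1))).drop 1 := by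
      rw [List.drop_drop]; congr 1; omega
    rw [hdd] at hc
    exact List.mem_of_mem_drop hc

theorem pvFullNumberish_iff (l : List Char) :
    pvFullNumberish l = true ↔ pvDotStep (l.dropWhile pvIsSignDigit) = [] := by
  have hfun : pvNumChar = pvIsSignDigit := funext pvNumChar_eq_sd
  constructor
  · exact pvFullNumberish_dotStep l
  · intro h
    unfold pvFullNumberish
    rw [hfun]
    rcases hdw : l.dropWhile pvIsSignDigit with _ | ⟨c, r⟩
    · rfl
    · rw [hdw] at h
      by_cases hc : c = '.'
      · subst hc
        rw [pvDotStep_dot] at h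
        simpa using List.dropWhile_eq_nil_iff.mp h
      · rw [pvDotStep_cons_ne c r hc] at h
        simp at h

theorem pvGet_neg (cs : List Char) (c : Char) (u : List Char) (i : Int) (hneg : i < 0)
    (hge : -(cs.length : Int) ≤ i) (hd : cs.drop ((cs.length : Int) + i).toNat = c :: u) :
    PySem.List.pyGet? cs i = some c := by
  have hm : ((cs.length : Int) + i).toNat < cs.length := by
    by_contra h
    rw [List.drop_eq_nil_of_le (by omega)] at hd
    simp at hd
  have hidx : cs[((cs.length : Int) + i).toNat]? = some c := by
    rw [← List.head?_drop, hd]; rfl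
  have hneg' : ¬ (0 ≤ i) := by omega
  simp only [PySem.List.pyGet?, PySem.List.pyIdx?]
  rw [if_neg hneg', if_pos hge]
  have : cs.length - (-i).toNat = ((cs.length : Int) + i).toNat := by omega
  rw [this]
  simpa using hidx

-- A's loop started at a non-positive index with num_chars = '+-0123456789'
theorem pvLoopA_noDotNeg (cs : List Char) (u : List Char) (i : Int) (fuel : Nat)
    (hI : i ≤ 0) (hge : -(cs.length : Int) ≤ i)
    (hd : cs.drop ((cs.length : Int) + i).toNat = u)
    (hfuel : cs.length + (-i).toNat < fuel) :
    pvLoopA cs "+-0123456789".toList i fuel =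
      if u.dropWhile pvIsSignDigit = [] then
        (cs.length : Int) - (cs.dropWhile pvIsSignDigit).length
      else i + u.length - (u.dropWhile pvIsSignDigit).length := by
  induction u generalizing i fuel with
  | nil =>
    have hi0 : i = 0 := by
      have := List.drop_eq_nil_iff.mp hd
      omega
    subst hi0
    rw [pvLoopA_noDot cs cs 0 fuel (by omega) (by simp) (by omega) (by omega)]
    simp
  | cons c u ih =>
    have hmlt : ((cs.length : Int) + i).toNat < cs.length := by
      by_contra hh
      rw [List.drop_eq_nil_of_le (by omega)] at hd
      simp at hd
    have hneg : i < 0 := by omega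
    have hget := pvGet_neg cs c u i hneg hge hd
    obtain ⟨f, rfl⟩ : ∃ f, fuel = f + 1 := ⟨fuel - 1, by omega⟩
    have hd' : cs.drop ((cs.length : Int) + (i + 1)).toNat = u := by
      have h1 : ((cs.length : Int) + (i + 1)).toNat = ((cs.length : Int) + i).toNat + 1 := by omega
      rw [h1, ← List.drop_drop, hd]
      rfl
    rw [pvLoopA, if_pos (by omega), hget]
    dsimp only
    by_cases hsd : pvIsSignDigit c = true
    · have hmem : c ∈ "+-0123456789".toList := by simpa [pvIsSignDigit] using hsd
      rw [if_pos hmem, if_neg (pvSD_ne_dot c hsd)]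
      rw [ih (i + 1) f (by omega) (by omega) hd' (by omega)]
      simp only [List.dropWhile, hsd, List.length_cons]
      split_ifs <;> first | rfl | (push_cast; omega)
    · have hmem : c ∉ "+-0123456789".toList := by simpa [pvIsSignDigit] using hsd
      rw [if_neg hmem]
      have hsd' : pvIsSignDigit c = false := by simpa using hsd
      simp only [List.dropWhile, hsd', List.length_cons]
      rw [if_neg (List.cons_ne_nil c u)]
      push_cast; omega

-- A's loop started at a non-positive index with num_chars = '.+-0123456789'
theorem pvLoopA_fullNeg (cs : List Char) (u : List Char) (i : Int) (fuel : Nat)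
    (hI : i ≤ 0) (hge : -(cs.length : Int) ≤ i)
    (hd : cs.drop ((cs.length : Int) + i).toNat = u)
    (hfuel : cs.length + (-i).toNat < fuel) :
    pvLoopA cs ".+-0123456789".toList i fuel =
      if u.dropWhile pvIsSignDigit = [] then
        (cs.length : Int) - (pvDotStep (cs.dropWhile pvIsSignDigit)).length
      else if pvDotStep (u.dropWhile pvIsSignDigit) = [] then
        (cs.length : Int) - (cs.dropWhile pvIsSignDigit).length
      else i + u.length - (pvDotStep (u.dropWhile pvIsSignDigit)).length := by
  induction u generalizing i fuel with
  | nil =>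
    have hi0 : i = 0 := by
      have := List.drop_eq_nil_iff.mp hd
      omega
    subst hi0
    rw [pvLoopA_full cs cs 0 fuel (by omega) (by simp) (by omega) (by omega)]
    simp
  | cons c u ih =>
    have hmlt : ((cs.length : Int) + i).toNat < cs.length := by
      by_contra hh
      rw [List.drop_eq_nil_of_le (by omega)] at hd
      simp at hd
    have hneg : i < 0 := by omega
    have hget := pvGet_neg cs c u i hneg hge hd
    obtain ⟨f, rfl⟩ : ∃ f, fuel = f + 1 := ⟨fuel - 1, by omega⟩
    have hd' : cs.drop ((cs.length : Int) + (i + 1)).toNat = u := by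
      have h1 : ((cs.length : Int) + (i + 1)).toNat = ((cs.length : Int) + i).toNat + 1 := by omega
      rw [h1, ← List.drop_drop, hd]
      rfl
    rw [pvLoopA, if_pos (by omega), hget]
    dsimp only
    by_cases hdot : c = '.'
    · subst hdot
      have hmem : ('.' : Char) ∈ ".+-0123456789".toList := by decide
      rw [if_pos hmem, if_pos rfl]
      rw [pvLoopA_noDotNeg cs u (i + 1) f (by omega) (by omega) hd' (by omega)]
      have hsd : pvIsSignDigit '.' = false := by decide
      have hdw : List.dropWhile pvIsSignDigit ('.' :: u) = '.' :: u := by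
        simp [List.dropWhile, hsd]
      rw [hdw, if_neg (List.cons_ne_nil '.' u), pvDotStep_dot]
      by_cases hU : List.dropWhile pvIsSignDigit u = []
      · rw [if_pos hU, if_pos hU]
      · rw [if_neg hU, if_neg hU]
        simp only [List.length_cons]
        push_cast
        omega
    · by_cases hsd : pvIsSignDigit c = true
      · have hmem : c ∈ ".+-0123456789".toList := pvSD_mem_full c hsd
        rw [if_pos hmem, if_neg hdot]
        rw [ih (i + 1) f (by omega) (by omega) hd' (by omega)]
        simp only [List.dropWhile, hsd, List.length_cons]
        split_ifs <;> first | rfl | (push_cast; omega)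
      · have hmem : c ∉ ".+-0123456789".toList := by
          intro h
          simp at h
          rcases h with h | h
          · exact hdot h
          · exact hsd (by simp [pvIsSignDigit]; tauto)
        rw [if_neg hmem]
        have hsd' : pvIsSignDigit c = false := by simpa using hsd
        simp only [List.dropWhile, hsd', List.length_cons]
        rw [pvDotStep_cons_ne c _ hdot]
        rw [if_neg (List.cons_ne_nil c u), if_neg (List.cons_ne_nil c u)]
        simp only [List.length_cons]
        push_cast; omega

-- ===== VERDICT (by name: the statement is the Claim_ definition above) =====
theorem get_pos_not_number_char_spec : Claim_unchanged_get_pos_not_number_char := by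
  intro line start _hdom hpre hnd
  unfold Pre_get_pos_not_number_char at hpre
  unfold D_get_pos_not_number_char at hnd
  unfold get_pos_not_number_char get_pos_not_number_char_alt
  set cs := line.toList with hcs
  by_cases hneg : start < 0
  · -- negative start outside D_: the whole line is number-like and the scanned tail has no dot; both sides give len
    have hfn : pvFullNumberish cs = true ∧ '.' ∉ cs.drop (cs.length + start).toNat := by
      by_contra h
      exact hnd ⟨hneg, fun hh => h hh⟩
    obtain ⟨hfull, hnod⟩ := hfn
    have hn1 : 1 ≤ cs.length := by omega
    set k : Nat := (-start).toNat with hk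
    have hks : start = -(k : Int) := by omega
    have hkn : k ≤ cs.length := by omega
    have hidx : (cs.length + start).toNat = cs.length - k := by omega
    rw [hidx] at hnod
    have hall : ∀ c ∈ cs.drop (cs.length - k), pvIsSignDigit c = true := by
      intro c hc
      rcases pvFullNumberish_chars cs hfull c (List.mem_of_mem_drop hc) with h | h
      · exact h
      · exact absurd (h ▸ hc) hnod
    rw [if_neg (by omega)]
    rw [hks]
    rw [pvLoopA_negWrap cs k _ hkn hall hfull (by omega)]
    rw [PySem.List.slice_some_none]
    rw [PySem.List.clampIdx_neg_natCast cs.length k (by omega)]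
    rw [List.dropWhile_eq_nil_iff.mpr (by simpa using hall)]
    simp [pvDotStep]
  · have h0 : 0 ≤ start := by omega
    by_cases hge : (cs.length : Int) ≤ start
    · rw [if_pos hge]
      unfold pvLoopA
      rw [if_neg (by omega)]
    · rw [if_neg hge]
      rw [PySem.List.slice_from _ h0]
      exact pvLoopA_full cs (cs.drop start.toNat) start _ h0 rfl (by omega) (by omega)

theorem get_pos_not_number_char_changed : Claim_changed_get_pos_not_number_char := by
  unfold Claim_changed_get_pos_not_number_char; decide

theorem get_pos_not_number_char_tight : Claim_exact_get_pos_not_number_char := by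
  intro line start _hdom hpre hD
  unfold Pre_get_pos_not_number_char at hpre
  unfold D_get_pos_not_number_char at hD
  obtain ⟨hneg, hnd⟩ := hD
  unfold get_pos_not_number_char get_pos_not_number_char_alt
  set cs := line.toList with hcs
  have hn1 : 1 ≤ cs.length := by omega
  set u : List Char := cs.drop ((cs.length : Int) + start).toNat with hu
  have hulen : u.length = (-start).toNat := by
    rw [hu, List.length_drop]
    omega
  rw [pvLoopA_fullNeg cs u start _ (by omega) (by omega) rfl (by omega)]
  rw [if_neg (by omega : ¬ ((cs.length : Int) ≤ start))]
  rw [PySem.List.slice_some_none]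
  have hclamp : PySem.List.clampIdx cs.length start = ((cs.length : Int) + start).toNat := by
    have hks : start = -(((-start).toNat : Nat) : Int) := by omega
    rw [hks, PySem.List.clampIdx_neg_natCast cs.length (-start).toNat (by omega)]
    omega
  rw [hclamp, ← hu]
  simp only []
  split_ifs with h1 h2
  · -- A stops scanning the tail, wraps, and runs the full pattern from 0; the line is not fully number-like
    have hdotfree : '.' ∉ u := by
      intro hmem
      have := List.dropWhile_eq_nil_iff.mp h1 '.' hmem
      simp [pvIsSignDigit] at this
    have hnotfull : pvFullNumberish cs ≠ true := fun hf => hnd ⟨hf, hdotfree⟩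
    have hne : pvDotStep (cs.dropWhile pvIsSignDigit) ≠ [] := fun hh =>
      hnotfull ((pvFullNumberish_iff cs).mpr hh)
    rw [h1, pvDotStep_nil]
    intro heq
    have : (pvDotStep (cs.dropWhile pvIsSignDigit)).length = 0 := by
      simp only [List.length_nil] at heq
      omega
    exact hne (List.length_eq_zero_iff.mp this)
  · -- the tail is consumed through a dot; A continues with '+-0123456789' from 0, B returns len
    have hdotu : '.' ∈ u := by
      rcases hdw : u.dropWhile pvIsSignDigit with _ | ⟨c, r⟩
      · exact absurd hdw h1
      · have hc : c = '.' := by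
          by_contra hc
          rw [hdw, pvDotStep_cons_ne c r hc] at h2
          simp at h2
        subst hc
        have hmd : '.' ∈ u.dropWhile pvIsSignDigit := by rw [hdw]; exact List.mem_cons_self ..
        rw [← List.takeWhile_append_dropWhile (p := pvIsSignDigit) (l := u)]
        exact List.mem_append_right _ hmd
    have hdotcs : '.' ∈ cs := List.mem_of_mem_drop (hu ▸ hdotu)
    have hne : cs.dropWhile pvIsSignDigit ≠ [] := by
      intro hh
      have := List.dropWhile_eq_nil_iff.mp hh '.' hdotcs
      simp [pvIsSignDigit] at this
    rw [h2]
    simp only [List.length_nil]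
    intro heq
    have : (cs.dropWhile pvIsSignDigit).length = 0 := by omega
    exact hne (List.length_eq_zero_iff.mp this)
  · -- A stops at a negative index, B's position is non-negative
    have hdlen : (pvDotStep (u.dropWhile pvIsSignDigit)).length ≤ u.length := by
      have h3 : (u.dropWhile pvIsSignDigit).length ≤ u.length := List.length_dropWhile_le ..
      rcases hdw : u.dropWhile pvIsSignDigit with _ | ⟨c, r⟩
      · simp [pvDotStep]
      · rw [hdw] at h3
        by_cases hc : c = '.'
        · subst hc
          rw [pvDotStep_dot]
          have := List.length_dropWhile_le pvIsSignDigit r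
          simp at h3
          omega
        · rw [pvDotStep_cons_ne c r hc]
          exact h3
    intro heq
    omega
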